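-- pv_equiv track=rewrite | github.com/JFrunk/bridge-bidding-app | backend/tests/regression/test_slam_diagnostics.py | _declarer_partnership
-- ===== SOURCE A (Python) =====
-- def _final_contract(auction):
--     """Extract final contract from auction."""
--     for bid in reversed(auction):
--         if bid not in ('Pass', 'X', 'XX'):
--             return bid
--     return None
--
-- def _declarer_partnership(auction, dealer='North'):
--     """Determine which partnership (NS/EW) won the contract."""
--     positions = ['North', 'East', 'South', 'West']
--     dealer_index = positions.index(dealer)
--     contract = _final_contract(auction)
--     if not contract:
--         return None
--     strain = contract[1:] if len(contract) > 1 else contract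
--     for i, bid in enumerate(auction):
--         if bid in ('Pass', 'X', 'XX'):
--             continue
--         if len(bid) >= 2 and bid[1:] == strain:
--             pos = positions[(dealer_index + i) % 4]
--             return 'NS' if pos in ('North', 'South') else 'EW'
--     return None
-- ===== SOURCE B (Python) =====
-- def _declarer_partnership(auction, dealer='North'):
--     """Determine which partnership (NS/EW) won the contract.
--
--     Single forward pass: track the last real bid (the contract) while
--     building a first-occurrence index of each strain bid[1:]."""
--     positions = ['North', 'East', 'South', 'West']
--     dealer_index = positions.index(dealer)
--     contract = None
--     first = {}
--     for i, bid in enumerate(auction):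
--         if bid in ('Pass', 'X', 'XX'):
--             continue
--         contract = bid
--         if len(bid) >= 2:
--             first.setdefault(bid[1:], i)
--     if not contract:
--         return None
--     strain = contract[1:] if len(contract) > 1 else contract
--     i = first.get(strain)
--     if i is None:
--         return None
--     pos = positions[(dealer_index + i) % 4]
--     return 'NS' if pos in ('North', 'South') else 'EW'
-- ===== Notes on version B (the rewrite author's own statement) =====
-- stated objective: alternative
-- what changed: A's reverse scan for the final contract plus a second forward scan for the first strain match are fused into one forward pass that tracks the last real bid and builds a first-occurrence dict from strain bid[1:] to index, answered by a single dict lookup.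
import Mathlib
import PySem

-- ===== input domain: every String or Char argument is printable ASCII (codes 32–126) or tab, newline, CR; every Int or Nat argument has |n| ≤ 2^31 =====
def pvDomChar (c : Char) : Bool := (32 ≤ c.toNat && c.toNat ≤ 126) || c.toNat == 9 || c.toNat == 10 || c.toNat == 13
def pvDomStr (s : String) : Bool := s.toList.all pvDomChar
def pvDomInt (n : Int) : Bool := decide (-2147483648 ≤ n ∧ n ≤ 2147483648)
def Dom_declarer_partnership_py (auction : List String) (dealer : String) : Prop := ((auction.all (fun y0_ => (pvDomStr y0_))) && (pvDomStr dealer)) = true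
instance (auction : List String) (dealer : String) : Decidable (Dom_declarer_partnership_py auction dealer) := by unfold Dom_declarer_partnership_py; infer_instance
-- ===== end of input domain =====

-- B fuses A's reverse scan (final contract) and forward scan (first matching strain)
-- into ONE forward pass that tracks the last real bid and a first-occurrence strain index
-- (objective: alternative decomposition; same return value on all inputs where A returns).

-- ===== PORT A =====
-- bid in ('Pass', 'X', 'XX')
def pvIsPassA (b : String) : Bool := b == "Pass" || b == "X" || b == "XX"

-- _final_contract: scans reversed(auction); called on auction.reverse below
def pvFinalContract : List String → Option String
  | [] => none
  | bid :: rest => if pvIsPassA bid then pvFinalContract rest else some bid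

-- the `for i, bid in enumerate(auction)` loop of A (strings sliced via toList: exact on code points)
def pvALoop (di : Nat) (strain : List Char) : List (Int × String) → Option String
  | [] => none
  | (i, bid) :: rest =>
    if pvIsPassA bid then pvALoop di strain rest
    else if 2 ≤ bid.toList.length ∧ PySem.List.slice bid.toList (some 1) none = strain then
      -- index (dealer_index + i) % 4 is always in range, so the default of pyGetD is never used
      let pos := PySem.List.pyGetD ["North", "East", "South", "West"] (PySem.Int.mod ((di : Int) + i) 4) ""
      some (if pos = "North" ∨ pos = "South" then "NS" else "EW")
    else pvALoop di strain rest

def declarer_partnership_py (auction : List String) (dealer : String) : Option String :=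
  let positions := ["North", "East", "South", "West"]
  match PySem.List.index? positions dealer with
  | none => none   -- Python raises ValueError here; excluded by Pre_
  | some di =>
    match pvFinalContract auction.reverse with
    | none => none
    | some contract =>
      if contract = "" then none   -- `if not contract`
      else
        let strain := if 1 < contract.toList.length
                      then PySem.List.slice contract.toList (some 1) none else contract.toList
        pvALoop di strain (PySem.List.enumerate auction)

-- ===== PORT B =====
-- bid in ('Pass', 'X', 'XX')
def pvIsPassB (b : String) : Bool := b == "Pass" || b == "X" || b == "XX"

-- B's single forward pass: last real bid + first-occurrence dict of strains bid[1:]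
def pvBLoop : List (Int × String) → Option String → PySem.Dict (List Char) Int →
    Option String × PySem.Dict (List Char) Int
  | [], c, d => (c, d)
  | (i, bid) :: rest, c, d =>
    if pvIsPassB bid then pvBLoop rest c d
    else
      let d' := if 2 ≤ bid.toList.length
                then d.setdefault (PySem.List.slice bid.toList (some 1) none) i else d
      pvBLoop rest (some bid) d'

def declarer_partnership_py_alt (auction : List String) (dealer : String) : Option String :=
  let positions := ["North", "East", "South", "West"]
  match PySem.List.index? positions dealer with
  | none => none   -- Python raises ValueError here; excluded by Pre_
  | some di =>
    match pvBLoop (PySem.List.enumerate auction) none PySem.Dict.empty with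
    | (none, _) => none
    | (some contract, first) =>
      if contract = "" then none   -- `if not contract`
      else
        let strain := if 1 < contract.toList.length
                      then PySem.List.slice contract.toList (some 1) none else contract.toList
        match first.get? strain with
        | none => none
        | some i =>
          let pos := PySem.List.pyGetD positions (PySem.Int.mod ((di : Int) + i) 4) ""
          some (if pos = "North" ∨ pos = "South" then "NS" else "EW")

-- ===== PRECONDITION & SPEC =====
-- Pre_ excludes exactly dealers outside the four seat names, where positions.index(dealer) raises ValueError.
def Pre_declarer_partnership_py (auction : List String) (dealer : String) : Prop :=
  dealer = "North" ∨ dealer = "East" ∨ dealer = "South" ∨ dealer = "West"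
instance (auction : List String) (dealer : String) : Decidable (Pre_declarer_partnership_py auction dealer) := by unfold Pre_declarer_partnership_py; infer_instance

def pvWitness_declarer_partnership_py : List String × String := (["1C", "Pass", "1NT", "Pass", "3NT", "Pass", "Pass", "Pass"], "North")

def Spec_declarer_partnership_py (auction : List String) (dealer : String) (out : Option String) : Prop := out = declarer_partnership_py_alt auction dealer
instance (auction : List String) (dealer : String) (out : Option String) : Decidable (Spec_declarer_partnership_py auction dealer out) := by unfold Spec_declarer_partnership_py; infer_instance

-- ===== CLAIM (what is proved, stated in full; the proofs are below) =====
def Claim_equal_declarer_partnership_py : Prop := ∀ (auction : List String) (dealer : String), Dom_declarer_partnership_py auction dealer → Pre_declarer_partnership_py auction dealer → Spec_declarer_partnership_py auction dealer (declarer_partnership_py auction dealer)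

-- ===== LEMMAS AND PROOFS =====

-- the strain-match predicate both proofs reduce their loops to
def pvQ (strain : List Char) (p : Int × String) : Bool :=
  !pvIsPassA p.2 && (decide (2 ≤ p.2.toList.length) && (PySem.List.slice p.2.toList (some 1) none == strain))

lemma pvIsPassB_eq (b : String) : pvIsPassB b = pvIsPassA b := rfl

lemma pvFinalContract_eq_find? (l : List String) :
    pvFinalContract l = l.find? (fun b => !pvIsPassA b) := by
  induction l with
  | nil => rfl
  | cons b l ih =>
    simp only [pvFinalContract, List.find?]
    cases h : pvIsPassA b <;> simp [ih]

lemma pvALoop_eq_find? (di : Nat) (strain : List Char) (l : List (Int × String)) :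
    pvALoop di strain l = (l.find? (pvQ strain)).map (fun p =>
      let pos := PySem.List.pyGetD ["North", "East", "South", "West"] (PySem.Int.mod ((di : Int) + p.1) 4) ""
      if pos = "North" ∨ pos = "South" then "NS" else "EW") := by
  induction l with
  | nil => rfl
  | cons p l ih =>
    obtain ⟨i, bid⟩ := p
    simp only [pvALoop]
    by_cases h1 : pvIsPassA bid
    · rw [if_pos h1, List.find?_cons_of_neg (by simp [pvQ, h1]), ih]
    · by_cases h2 : 2 ≤ bid.toList.length ∧ PySem.List.slice bid.toList (some 1) none = strain
      · have hq : pvQ strain (i, bid) = true := by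
          simp only [pvQ, Bool.and_eq_true, Bool.not_eq_true', decide_eq_true_eq, beq_iff_eq]
          exact ⟨by simpa using h1, h2.1, h2.2⟩
        rw [if_neg h1, if_pos h2, List.find?_cons_of_pos hq]
        rfl
      · have hq : ¬ pvQ strain (i, bid) = true := by
          simp only [pvQ, Bool.and_eq_true, Bool.not_eq_true', decide_eq_true_eq, beq_iff_eq]
          rintro ⟨-, hlen, hsl⟩
          exact h2 ⟨hlen, hsl⟩
        rw [if_neg h1, if_neg h2, List.find?_cons_of_neg hq, ih]

lemma pvBLoop_fst (l : List (Int × String)) (c : Option String) (d : PySem.Dict (List Char) Int) :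
    (pvBLoop l c d).1 = ((l.reverse.find? (fun p => !pvIsPassA p.2)).map Prod.snd).or c := by
  induction l generalizing c d with
  | nil => rfl
  | cons p l ih =>
    obtain ⟨i, bid⟩ := p
    rw [List.reverse_cons, List.find?_append]
    simp only [pvBLoop, pvIsPassB_eq]
    by_cases h1 : pvIsPassA bid
    · rw [if_pos h1, ih, List.find?_cons_of_neg (by simp [h1]), List.find?_nil, Option.or_none]
    · rw [if_neg h1, ih, List.find?_cons_of_pos (by simp [h1])]
      cases List.find? (fun p => !pvIsPassA p.2) l.reverse <;> simp

lemma pvBLoop_snd_get? (l : List (Int × String)) (c : Option String) (d : PySem.Dict (List Char) Int)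
    (k : List Char) :
    ((pvBLoop l c d).2).get? k = (d.get? k).or ((l.find? (pvQ k)).map Prod.fst) := by
  induction l generalizing c d with
  | nil => simp [pvBLoop]
  | cons p l ih =>
    obtain ⟨i, bid⟩ := p
    simp only [pvBLoop, pvIsPassB_eq]
    by_cases h1 : pvIsPassA bid
    · rw [if_pos h1, List.find?_cons_of_neg (by simp [pvQ, h1]), ih]
    · rw [if_neg h1]
      by_cases h2 : 2 ≤ bid.toList.length
      · rw [if_pos h2]
        set key := PySem.List.slice bid.toList (some 1) none with hkey
        by_cases h3 : key = k
        · subst h3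
          have hq : pvQ key (i, bid) = true := by
            simp only [pvQ, Bool.and_eq_true, Bool.not_eq_true', decide_eq_true_eq, beq_iff_eq]
            exact ⟨by simpa using h1, h2, rfl⟩
          rw [List.find?_cons_of_pos hq]
          cases hget : d.get? key with
          | none =>
            have hc : d.contains key = false := by
              rw [PySem.Dict.contains_eq_isSome_get?, hget]; rfl
            rw [PySem.Dict.setdefault_of_not_contains _ _ hc, ih,
              PySem.Dict.get?_insert_self]
            rfl
          | some v =>
            have hc : d.contains key = true := by
              rw [PySem.Dict.contains_eq_isSome_get?, hget]; rfl
            rw [PySem.Dict.setdefault_of_contains _ _ hc, ih, hget]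
            rfl
        · have hq : ¬ pvQ k (i, bid) = true := by
            simp only [pvQ, Bool.and_eq_true, Bool.not_eq_true', decide_eq_true_eq, beq_iff_eq]
            rintro ⟨-, -, hsl⟩
            exact h3 hsl
          rw [List.find?_cons_of_neg hq]
          by_cases hc : d.contains key
          · rw [PySem.Dict.setdefault_of_contains _ _ hc, ih]
          · rw [PySem.Dict.setdefault_of_not_contains _ _ (by simpa using hc), ih,
              PySem.Dict.get?_insert_of_ne _ _ (Ne.symm h3)]
      · rw [if_neg h2, List.find?_cons_of_neg (p := pvQ k) (by
          simp only [pvQ, Bool.and_eq_true, Bool.not_eq_true', decide_eq_true_eq, beq_iff_eq]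
          rintro ⟨-, hlen, -⟩
          exact h2 hlen), ih]

-- ===== VERDICT (by name: the statement is the Claim_ definition above) =====
-- A's two scans, reduced to find? on the enumerated auction
lemma pvContract_eq (auction : List String) :
    (pvBLoop (PySem.List.enumerate auction) none PySem.Dict.empty).1
      = pvFinalContract auction.reverse := by
  rw [pvBLoop_fst, Option.or_none, pvFinalContract_eq_find?]
  conv_rhs => rw [← PySem.List.map_snd_enumerate auction 0, ← List.map_reverse,
    List.find?_map]
  rfl

theorem declarer_partnership_py_spec : Claim_equal_declarer_partnership_py := by
  intro auction dealer _hdom _hpre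
  unfold Spec_declarer_partnership_py
  simp only [declarer_partnership_py, declarer_partnership_py_alt]
  cases hidx : PySem.List.index? ["North", "East", "South", "West"] dealer with
  | none => rfl
  | some di =>
    cases hbl : pvBLoop (PySem.List.enumerate auction) none PySem.Dict.empty with
    | mk copt first =>
      have hc := pvContract_eq auction
      rw [hbl] at hc
      rw [← hc]
      cases copt with
      | none => rfl
      | some contract =>
        dsimp only
        by_cases hemp : contract = ""
        · rw [if_pos hemp, if_pos hemp]
        · rw [if_neg hemp, if_neg hemp]
          have hfirst : first.get? (if 1 < contract.toList.length
              then PySem.List.slice contract.toList (some 1) none else contract.toList)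
              = ((PySem.List.enumerate auction).find? (pvQ (if 1 < contract.toList.length
                  then PySem.List.slice contract.toList (some 1) none else contract.toList))).map Prod.fst := by
            have h := pvBLoop_snd_get? (PySem.List.enumerate auction) none PySem.Dict.empty
              (if 1 < contract.toList.length
                then PySem.List.slice contract.toList (some 1) none else contract.toList)
            rw [hbl] at h
            simpa using h
          rw [pvALoop_eq_find?, hfirst]
          cases (PySem.List.enumerate auction).find? (pvQ (if 1 < contract.toList.length
              then PySem.List.slice contract.toList (some 1) none else contract.toList)) with
          | none => rfl
          | some q => rfl
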